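-- pv_equiv track=rewrite | github.com/celeybutlin/pdx_code | lab10.py | letter_splitter
-- ===== SOURCE A (Python) =====
-- def letter_splitter(user_input):
--     str_to_words = user_input.split()
--     all_letters = list()
--     for word in str_to_words:
--         letter = list(word)
--         all_letters += letter
--         all_letters.sort()
--     return all_letters
-- ===== SOURCE B (Python) =====
-- def letter_splitter(user_input):
--     counts = {}
--     for word in user_input.split():
--         for ch in word:
--             counts[ch] = counts.get(ch, 0) + 1
--     result = []
--     for ch in sorted(counts):
--         result += [ch] * counts[ch]
--     return result
-- ===== Notes on version B (the rewrite author's own statement) =====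
-- stated objective: alternative
-- what changed: B builds a character-frequency table in one pass and reconstructs the output by sorting only the distinct characters and repeating each by its count (counting-sort style), instead of A's re-sorting of the whole accumulated list after every word.
import Mathlib
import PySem

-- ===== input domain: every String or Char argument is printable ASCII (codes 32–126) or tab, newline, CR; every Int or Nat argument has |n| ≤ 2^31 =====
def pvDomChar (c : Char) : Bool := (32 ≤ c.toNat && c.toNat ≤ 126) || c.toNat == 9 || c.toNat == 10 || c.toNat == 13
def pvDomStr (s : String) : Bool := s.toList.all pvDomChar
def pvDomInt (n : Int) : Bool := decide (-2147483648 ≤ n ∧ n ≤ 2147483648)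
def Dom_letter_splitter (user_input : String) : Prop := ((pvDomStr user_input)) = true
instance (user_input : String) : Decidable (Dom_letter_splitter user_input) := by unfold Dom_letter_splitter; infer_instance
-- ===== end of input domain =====

-- B replaces A's per-word re-sort of the whole accumulated list with a frequency table
-- plus a counting-sort reconstruction over the sorted distinct characters (alternative algorithm).


-- ===== PORT A =====
-- list(word): the word's characters as one-character strings
def pvChars (w : String) : List String := w.toList.map (fun c => String.mk [c])

def letter_splitter (user_input : String) : List String :=
  let str_to_words := PySem.Str.split₀ user_input
  str_to_words.foldl
    (fun all_letters word =>
      PySem.List.sorted (all_letters ++ pvChars word) (fun x => x))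
    []

-- ===== PORT B =====
-- counts[ch] on the reconstruction pass is ported as getD with default 0; it is exact
-- because every ch iterated there is a key of counts.
def letter_splitter_alt (user_input : String) : List String :=
  let counts :=
    (PySem.Str.split₀ user_input).foldl
      (fun d word => (pvChars word).foldl (fun d ch => d.insert ch (d.getD ch 0 + 1)) d)
      PySem.Dict.empty
  (PySem.List.sorted counts.keys (fun x => x)).foldl
    (fun result ch => result ++ PySem.List.pyRepeat [ch] (counts.getD ch 0))
    []

-- ===== PRECONDITION & SPEC =====
def Spec_letter_splitter (user_input : String) (out : List String) : Prop := out = letter_splitter_alt user_input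
instance (user_input : String) (out : List String) : Decidable (Spec_letter_splitter user_input out) := by unfold Spec_letter_splitter; infer_instance

-- ===== CLAIM (what is proved, stated in full; the proofs are below) =====
def Claim_equal_letter_splitter : Prop := ∀ (user_input : String), Dom_letter_splitter user_input → Spec_letter_splitter user_input (letter_splitter user_input)

-- ===== LEMMAS AND PROOFS =====

-- B's nested count loop builds Counter of the flat character list
lemma counts_eq (u : String) :
    (PySem.Str.split₀ u).foldl
      (fun d word => (pvChars word).foldl (fun d ch => d.insert ch (d.getD ch 0 + 1)) d)
      PySem.Dict.empty
    = PySem.Dict.counter ((PySem.Str.split₀ u).flatMap pvChars) := by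
  have h : (fun (d : PySem.Dict String Int) ch => d.insert ch (d.getD ch 0 + 1))
      = fun (d : PySem.Dict String Int) ch => d.modify ch 0 (· + 1) :=
    funext fun d => funext fun ch => PySem.Dict.ext_iff.mpr rfl
  rw [h, PySem.Dict.counter_eq_foldl, List.foldl_flatMap]

-- A's loop invariant: the accumulated list stays one sort of everything appended so far
lemma foldl_sort_step (ws : List String) (acc : List String) :
    ws.foldl (fun all w => PySem.List.sorted (all ++ pvChars w) (fun x => x))
      (PySem.List.sorted acc (fun x => x))
    = PySem.List.sorted (acc ++ ws.flatMap pvChars) (fun x => x) := by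
  induction ws generalizing acc with
  | nil => simp
  | cons w ws ih =>
    simp only [List.foldl_cons, List.flatMap_cons]
    rw [PySem.List.sorted_eq_sorted_of_perm (PySem.List.sorted acc (fun x => x) ++ pvChars w)
      (acc ++ pvChars w) (fun x => x) (fun a b h => h)
      ((PySem.List.sorted_perm acc (fun x => x) false).append_right _),
      ih (acc ++ pvChars w), List.append_assoc]

-- A is one sort of the flat character list
lemma a_eq_sorted (u : String) :
    letter_splitter u
    = PySem.List.sorted ((PySem.Str.split₀ u).flatMap pvChars) (fun x => x) := by
  have := foldl_sort_step (PySem.Str.split₀ u) []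
  simpa [letter_splitter] using this

-- blocks of equal elements over a strictly increasing key list are weakly increasing
lemma pairwise_flatMap_replicate (K : List String) (n : String → Nat)
    (h : K.Pairwise (· < ·)) :
    (K.flatMap (fun k => List.replicate (n k) k)).Pairwise (· ≤ ·) := by
  induction K with
  | nil => simp
  | cons k K ih =>
    rcases List.pairwise_cons.mp h with ⟨hk, hK⟩
    simp only [List.flatMap_cons]
    rw [List.pairwise_append]
    refine ⟨List.pairwise_replicate.mpr (Or.inr le_rfl), ih hK, ?_⟩
    intro a ha b hb
    rcases List.mem_flatMap.mp hb with ⟨k', hk', hb'⟩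
    rw [List.eq_of_mem_replicate ha, List.eq_of_mem_replicate hb']
    exact le_of_lt (hk k' hk')

-- multiplicity of a in the block decomposition
lemma count_flatMap_replicate (K : List String) (n : String → Nat) (a : String)
    (hnd : K.Nodup) :
    (K.flatMap (fun k => List.replicate (n k) k)).count a = if a ∈ K then n a else 0 := by
  induction K with
  | nil => simp
  | cons k K ih =>
    rcases List.nodup_cons.mp hnd with ⟨hk, hK⟩
    simp only [List.flatMap_cons, List.count_append, List.count_replicate, ih hK, List.mem_cons]
    by_cases hak : a = k
    · subst hak
      simp [hk]
    · simp [hak, Ne.symm hak]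

-- counting-sort reconstruction: sorted distinct keys, each repeated by its multiplicity
lemma sorted_eq_flatMap_replicate (L : List String) :
    PySem.List.sorted L (fun x => x)
    = (PySem.List.sorted (PySem.Set.ofList L) (fun x => x)).flatMap
        (fun k => List.replicate (L.count k) k) := by
  have hlt := PySem.List.sorted_ofList_pairwise_lt L
  have hnd : (PySem.List.sorted (PySem.Set.ofList L) (fun x => x)).Nodup :=
    hlt.imp ne_of_lt
  apply PySem.List.sorted_id_eq_of_perm_of_pairwise
  · rw [List.perm_iff_count]
    intro a
    rw [count_flatMap_replicate _ _ _ hnd]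
    by_cases ha : a ∈ L
    · have : a ∈ PySem.List.sorted (PySem.Set.ofList L) (fun x => x) := by
        rw [PySem.List.mem_sorted, PySem.Set.mem_ofList]; exact ha
      simp [this]
    · have : a ∉ PySem.List.sorted (PySem.Set.ofList L) (fun x => x) := by
        rw [PySem.List.mem_sorted, PySem.Set.mem_ofList]; exact ha
      simp [this, List.count_eq_zero.mpr ha]
  · exact pairwise_flatMap_replicate _ _ hlt

-- ===== VERDICT (by name: the statement is the Claim_ definition above) =====
theorem letter_splitter_spec : Claim_equal_letter_splitter := by
  intro u _
  unfold Spec_letter_splitter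
  show letter_splitter u
      = (PySem.List.sorted (PySem.Dict.keys _) (fun x => x)).foldl
          (fun result ch => result ++ PySem.List.pyRepeat [ch] (PySem.Dict.getD _ ch 0)) []
  rw [counts_eq, a_eq_sorted, PySem.Dict.keys_counter,
    PySem.List.foldl_append_eq_flatMap
      (fun ch => PySem.List.pyRepeat [ch]
        ((PySem.Dict.counter ((PySem.Str.split₀ u).flatMap pvChars)).getD ch 0))]
  simp only [List.nil_append, PySem.List.pyRepeat_singleton, PySem.Dict.getD_counter,
    Int.toNat_natCast]
  exact sorted_eq_flatMap_replicate _
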